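-- pv_equiv track=rewrite | github.com/sbirnb/adventofcode2024 | src/adventofcode2024/d22.py | repeat_transform
-- ===== SOURCE A (Python) =====
-- from functools import reduce
-- from typing import Iterable, Iterator, Sequence, Set
--
-- def identity_transform(bits: int) -> Sequence[Set[int]]:
--     return tuple({index} for index in range(bits))
--
-- def repeat_transform(transform: Sequence[Set[int]], times: int) -> Sequence[Set[int]]:
--
--     def compose_transforms(t1: Sequence[Set[int]], t2: Sequence[Set[int]]) -> Sequence[Set[int]]:
--         return tuple(reduce(lambda s1, i: (s1 | t2[i]) - (s1 & t2[i]), s2, set()) for j, s2 in enumerate(t1))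
--
--     res = identity_transform(len(transform))
--     squaring = transform
--     while times > 0:
--         if times & 1:
--             res = compose_transforms(squaring, res)
--         squaring = compose_transforms(squaring, squaring)
--         times >>= 1
--     return res
-- ===== SOURCE B (Python) =====
-- def repeat_transform(transform, times):
--     n = len(transform)
--
--     def compose_transforms(t1, t2):
--         out = []
--         for s in t1:
--             acc = set()
--             for i in s:
--                 acc ^= t2[i]
--             out.append(acc)
--         return tuple(out)
--
--     def power(k):
--         if k <= 0:
--             return tuple({index} for index in range(n))
--         sq_half = power(k // 2)
--         sq = compose_transforms(sq_half, sq_half)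
--         return compose_transforms(transform, sq) if k % 2 else sq
--
--     return power(times)
-- ===== Notes on version B (the rewrite author's own statement) =====
-- stated objective: alternative
-- what changed: A's LSB-first square-and-multiply loop (repeatedly self-squaring the base and composing set bits into an accumulator) is replaced by top-down recursive halving: power(k) squares power(k//2) and composes the base in once when k is odd; the compose helper is an explicit row loop instead of reduce/tuple.
import Mathlib
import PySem

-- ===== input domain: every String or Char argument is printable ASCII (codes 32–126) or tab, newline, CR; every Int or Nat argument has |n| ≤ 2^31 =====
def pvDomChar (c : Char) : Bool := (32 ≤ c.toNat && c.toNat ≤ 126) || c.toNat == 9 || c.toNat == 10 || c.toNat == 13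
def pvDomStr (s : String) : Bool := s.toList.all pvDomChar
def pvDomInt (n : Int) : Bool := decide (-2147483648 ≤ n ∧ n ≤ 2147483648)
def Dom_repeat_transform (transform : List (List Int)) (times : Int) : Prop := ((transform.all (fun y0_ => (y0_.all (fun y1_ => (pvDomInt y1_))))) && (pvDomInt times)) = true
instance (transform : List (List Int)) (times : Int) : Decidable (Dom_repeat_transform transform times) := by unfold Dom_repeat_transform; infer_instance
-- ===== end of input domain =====

-- B replaces A's LSB-first square-and-multiply loop (base self-squared, accumulator res) by
-- top-down recursive halving: power(k) squares power(k // 2) and composes the base once when k is odd.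
-- Python set values are modelled canonically as strictly increasing duplicate-free lists
-- (Python does not specify a set's iteration order; set outputs are compared as finite sets).

-- ===== PORT A =====
-- canonical model of a Python set value: sorted(set(xs))
def canonSet (xs : List Int) : List Int :=
  PySem.List.sorted (PySem.Set.ofList xs) (fun x => x) false

-- (s1 | t) - (s1 & t)  =  symmetric difference of two sets, as a canonical set value
def symdif (s t : List Int) : List Int := canonSet (PySem.Set.symmDiff s t)

-- reduce(lambda s1, i: (s1 | t2[i]) - (s1 & t2[i]), s2, set())
def rowF (t2 : List (List Int)) (s2 : List Int) : List Int :=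
  s2.foldl (fun s1 i => symdif s1 (PySem.List.pyGetD t2 i [])) []

-- compose_transforms(t1, t2)
def composeT (t1 t2 : List (List Int)) : List (List Int) := t1.map (rowF t2)

-- identity_transform(bits)
def identity_transform (bits : Nat) : List (List Int) :=
  (List.range bits).map (fun (i : Nat) => ([(i : Int)] : List Int))

-- while times > 0: …   (times & 1 is times % 2 and times >>= 1 is times // 2, exact for every Python int)
def aLoop (squaring res : List (List Int)) (times : Int) : List (List Int) :=
  if _h : 0 < times then
    aLoop (composeT squaring squaring)
      (if PySem.Int.mod times 2 = 1 then composeT squaring res else res)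
      (PySem.Int.floordiv times 2)
  else res
termination_by times.toNat
decreasing_by
  have h2 : PySem.Int.floordiv times 2 = times / 2 := PySem.Int.floordiv_eq_ediv_of_pos (by omega)
  rw [h2]; omega

def repeat_transform (transform : List (List Int)) (times : Int) : List (List Int) :=
  aLoop (transform.map canonSet) (identity_transform transform.length) times

-- ===== PORT B =====
-- compose_transforms in Source B: explicit loop appending one composed row at a time
def altCompose (t1 t2 : List (List Int)) : List (List Int) :=
  t1.foldl (fun out s =>
    out ++ [s.foldl (fun acc i => symdif acc (PySem.List.pyGetD t2 i [])) []]) []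

-- power(k): recursive halving — square power(k // 2), compose the base once if k is odd
def altPower (transform : List (List Int)) (n : Nat) (k : Int) : List (List Int) :=
  if _h : k ≤ 0 then (List.range n).map (fun (index : Nat) => ([(index : Int)] : List Int))
  else
    let sq_half := altPower transform n (PySem.Int.floordiv k 2)
    let sq := altCompose sq_half sq_half
    if PySem.Int.mod k 2 ≠ 0 then altCompose transform sq else sq
termination_by k.toNat
decreasing_by
  have h2 : PySem.Int.floordiv k 2 = k / 2 := PySem.Int.floordiv_eq_ediv_of_pos (by omega)
  rw [h2]; omega

def repeat_transform_alt (transform : List (List Int)) (times : Int) : List (List Int) :=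
  altPower (transform.map canonSet) transform.length times

-- ===== PRECONDITION & SPEC =====
-- Pre_ excludes exactly the inputs on which A raises IndexError: a positive 'times' together with
-- some row element that is not a valid (possibly negative) index into the transform.
def Pre_repeat_transform (transform : List (List Int)) (times : Int) : Prop :=
  0 < times → ∀ r ∈ transform, ∀ i ∈ r, PySem.Raise.InRange transform.length i

instance (transform : List (List Int)) (times : Int) : Decidable (Pre_repeat_transform transform times) := by
  unfold Pre_repeat_transform; infer_instance

def pvWitness_repeat_transform : List (List Int) × Int := ([[0, 1], [1]], 3)

def Spec_repeat_transform (transform : List (List Int)) (times : Int) (out : List (List Int)) : Prop :=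
  out = repeat_transform_alt transform times

instance (transform : List (List Int)) (times : Int) (out : List (List Int)) : Decidable (Spec_repeat_transform transform times out) := by
  unfold Spec_repeat_transform; infer_instance

-- ===== CLAIM =====
def Claim_equal_repeat_transform : Prop :=
  ∀ (transform : List (List Int)) (times : Int), Dom_repeat_transform transform times →
    Pre_repeat_transform transform times →
    Spec_repeat_transform transform times (repeat_transform transform times)


-- ===== LEMMAS AND PROOFS =====
-- XOR-indicator of a set value, in the boolean group Int → ZMod 2
def phi (s : List Int) : Int → ZMod 2 := fun x => if x ∈ s then 1 else 0

-- XOR-sum of the rows of x selected by the index list s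
def appG (x : List (List Int)) (s : List Int) : Int → ZMod 2 :=
  s.foldl (fun g i => g + phi (PySem.List.pyGetD x i [])) 0

def CanonL (s : List Int) : Prop := s.Pairwise (· < ·)
def CanonM (t : List (List Int)) : Prop := ∀ r ∈ t, CanonL r

theorem mem_canonSet (xs : List Int) (x : Int) : x ∈ canonSet xs ↔ x ∈ xs := by
  simp [canonSet, PySem.List.mem_sorted, PySem.Set.mem_ofList]

theorem canonL_canonSet (xs : List Int) : CanonL (canonSet xs) :=
  PySem.List.sorted_ofList_pairwise_lt xs

theorem CanonL.nodup {s : List Int} (h : CanonL s) : s.Nodup :=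
  h.imp (fun hlt => ne_of_lt hlt)

theorem canonSet_eq_self {s : List Int} (h : CanonL s) : canonSet s = s := by
  unfold canonSet
  rw [PySem.Set.ofList_eq_self_of_nodup _ h.nodup, PySem.List.sorted_eq_self_of_pairwise]
  exact h.imp (fun hlt => le_of_lt hlt)

theorem sorted_lt_ext : ∀ {s t : List Int}, CanonL s → CanonL t → (∀ x, x ∈ s ↔ x ∈ t) → s = t := by
  intro s
  induction s with
  | nil =>
    intro t _ _ h
    cases t with
    | nil => rfl
    | cons b t' => exact absurd ((h b).mpr (List.mem_cons_self)) (by simp)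
  | cons a s' ih =>
    intro t hs ht h
    cases t with
    | nil => exact absurd ((h a).mp (List.mem_cons_self)) (by simp)
    | cons b t' =>
      have hs' := List.pairwise_cons.mp hs
      have ht' := List.pairwise_cons.mp ht
      have hab : a = b := by
        rcases List.mem_cons.mp ((h a).mp List.mem_cons_self) with h1 | h1
        · exact h1
        · have hba : b < a := ht'.1 a h1
          rcases List.mem_cons.mp ((h b).mpr List.mem_cons_self) with h2 | h2
          · exact h2.symm
          · have : a < b := hs'.1 b h2
            omega
      subst hab
      have htail : ∀ x, x ∈ s' ↔ x ∈ t' := by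
        intro x
        constructor
        · intro hx
          rcases List.mem_cons.mp ((h x).mp (List.mem_cons_of_mem _ hx)) with h1 | h1
          · subst h1; exact absurd (hs'.1 x hx) (lt_irrefl x)
          · exact h1
        · intro hx
          rcases List.mem_cons.mp ((h x).mpr (List.mem_cons_of_mem _ hx)) with h1 | h1
          · subst h1; exact absurd (ht'.1 x hx) (lt_irrefl x)
          · exact h1
      rw [ih hs'.2 ht'.2 htail]

theorem mem_symdif (s t : List Int) (x : Int) :
    x ∈ symdif s t ↔ (x ∈ s ∧ x ∉ t) ∨ (x ∈ t ∧ x ∉ s) := by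
  rw [symdif, mem_canonSet]; exact PySem.Set.mem_symmDiff s t x

theorem canonL_symdif (s t : List Int) : CanonL (symdif s t) := canonL_canonSet _

theorem phi_nil : phi [] = 0 := by funext x; simp [phi]

theorem phi_symdif (s t : List Int) : phi (symdif s t) = phi s + phi t := by
  funext x
  simp only [phi, Pi.add_apply, mem_symdif]
  by_cases h1 : x ∈ s <;> by_cases h2 : x ∈ t <;> simp [h1, h2]
  decide

theorem eq_of_phi {s t : List Int} (hs : CanonL s) (ht : CanonL t) (h : phi s = phi t) : s = t := by
  apply sorted_lt_ext hs ht
  intro x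
  have hx := congrFun h x
  simp only [phi] at hx
  constructor
  · intro h1
    by_contra h2
    rw [if_pos h1, if_neg h2] at hx
    exact one_ne_zero hx
  · intro h2
    by_contra h1
    rw [if_neg h1, if_pos h2] at hx
    exact zero_ne_one hx

theorem canonSet_congr {u v : List Int} (h : ∀ x, x ∈ u ↔ x ∈ v) : canonSet u = canonSet v :=
  eq_of_phi (canonL_canonSet u) (canonL_canonSet v)
    (funext fun x => by simp [phi, mem_canonSet, h x])

theorem foldl_add_g {beta : Type} (l : List beta) (g : beta → (Int → ZMod 2)) (a : Int → ZMod 2) :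
    l.foldl (fun acc x => acc + g x) a = a + (l.map g).sum := by
  induction l generalizing a with
  | nil => simp
  | cons x l ih => simp [ih, add_assoc]

theorem appG_eq_sum (x : List (List Int)) {l : List Int} (hl : l.Nodup) :
    appG x l = ∑ i ∈ l.toFinset, phi (PySem.List.pyGetD x i []) := by
  unfold appG
  rw [foldl_add_g, zero_add, List.sum_toFinset _ hl]

theorem sum_symmDiff_G (A B : Finset Int) (F : Int → (Int → ZMod 2)) :
    ∑ x ∈ symmDiff A B, F x = ∑ x ∈ A, F x + ∑ x ∈ B, F x := by
  have h2 : symmDiff A B = (A ∪ B) \ (A ∩ B) := by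
    rw [symmDiff_eq_sup_sdiff_inf]; rfl
  have e1 : ∑ x ∈ (A ∪ B) \ (A ∩ B), F x + ∑ x ∈ A ∩ B, F x = ∑ x ∈ A ∪ B, F x :=
    Finset.sum_sdiff Finset.inter_subset_union
  have h1 : ∑ x ∈ A ∪ B, F x + ∑ x ∈ A ∩ B, F x = ∑ x ∈ A, F x + ∑ x ∈ B, F x :=
    Finset.sum_union_inter
  have h0 : ∑ x ∈ A ∩ B, F x + ∑ x ∈ A ∩ B, F x = 0 := by
    funext y; exact CharTwo.add_eq_zero.mpr rfl
  rw [h2]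
  calc ∑ x ∈ (A ∪ B) \ (A ∩ B), F x
      = ∑ x ∈ (A ∪ B) \ (A ∩ B), F x + (∑ x ∈ A ∩ B, F x + ∑ x ∈ A ∩ B, F x) := by
        rw [h0, add_zero]
    _ = (∑ x ∈ (A ∪ B) \ (A ∩ B), F x + ∑ x ∈ A ∩ B, F x) + ∑ x ∈ A ∩ B, F x := by
        rw [add_assoc]
    _ = ∑ x ∈ A ∪ B, F x + ∑ x ∈ A ∩ B, F x := by rw [e1]
    _ = ∑ x ∈ A, F x + ∑ x ∈ B, F x := h1

theorem toFinset_symdif (s t : List Int) :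
    (symdif s t).toFinset = symmDiff s.toFinset t.toFinset := by
  ext x
  simp only [List.mem_toFinset, mem_symdif, Finset.mem_symmDiff]

theorem appG_symdif (c : List (List Int)) {s t : List Int} (hs : s.Nodup) (ht : t.Nodup) :
    appG c (symdif s t) = appG c s + appG c t := by
  rw [appG_eq_sum c (canonL_symdif s t).nodup, appG_eq_sum c hs, appG_eq_sum c ht,
    toFinset_symdif, sum_symmDiff_G]

theorem phi_fold (t2 : List (List Int)) :
    ∀ (s2 s1 : List Int),
      phi (s2.foldl (fun s1 i => symdif s1 (PySem.List.pyGetD t2 i [])) s1)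
        = s2.foldl (fun g i => g + phi (PySem.List.pyGetD t2 i [])) (phi s1) := by
  intro s2
  induction s2 with
  | nil => intro s1; rfl
  | cons i s2 ih =>
    intro s1
    rw [List.foldl_cons, List.foldl_cons, ih, phi_symdif]

theorem phi_rowF (t2 : List (List Int)) (s2 : List Int) : phi (rowF t2 s2) = appG t2 s2 := by
  unfold rowF appG
  rw [phi_fold, phi_nil]

theorem canonL_rowF (t2 : List (List Int)) (s2 : List Int) : CanonL (rowF t2 s2) := by
  unfold rowF
  suffices h : ∀ (s2 s1 : List Int), CanonL s1 →
      CanonL (s2.foldl (fun s1 i => symdif s1 (PySem.List.pyGetD t2 i [])) s1) by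
    exact h s2 [] List.Pairwise.nil
  intro s2
  induction s2 with
  | nil => intro s1 h1; exact h1
  | cons i s2 ih => intro s1 _; exact ih _ (canonL_symdif _ _)

theorem nodup_pyGetD_row {t : List (List Int)} (ht : CanonM t) (i : Int) :
    (PySem.List.pyGetD t i []).Nodup := by
  by_cases hr : PySem.Raise.InRange t.length i
  · exact (ht _ (PySem.List.pyGetD_mem t [] hr)).nodup
  · rw [PySem.List.pyGetD_of_none t i [] ((PySem.List.pyGet?_eq_none_iff t i).mpr hr)]
    exact List.nodup_nil

theorem appG_fold {b : List (List Int)} (hb : CanonM b) (c : List (List Int)) :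
    ∀ (s2 s1 : List Int), CanonL s1 →
      appG c (s2.foldl (fun s1 i => symdif s1 (PySem.List.pyGetD b i [])) s1)
        = s2.foldl (fun g i => g + appG c (PySem.List.pyGetD b i [])) (appG c s1) := by
  intro s2
  induction s2 with
  | nil => intro s1 _; rfl
  | cons i s2 ih =>
    intro s1 hs1
    rw [List.foldl_cons, List.foldl_cons, ih _ (canonL_symdif _ _),
      appG_symdif c hs1.nodup (nodup_pyGetD_row hb i)]

theorem row_assoc {b : List (List Int)} (hb : CanonM b) (c : List (List Int)) (s2 : List Int) :
    rowF (composeT b c) s2 = rowF c (rowF b s2) := by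
  apply eq_of_phi (canonL_rowF _ _) (canonL_rowF _ _)
  rw [phi_rowF, phi_rowF]
  have hfun : (fun (g : Int → ZMod 2) (i : Int) => g + phi (PySem.List.pyGetD (composeT b c) i []))
      = (fun g i => g + appG c (PySem.List.pyGetD b i [])) := by
    funext g i
    have hmap : PySem.List.pyGetD (composeT b c) i [] = rowF c (PySem.List.pyGetD b i []) := by
      have h := PySem.List.pyGetD_map (rowF c) b i []
      simpa [composeT, rowF] using h
    rw [hmap, phi_rowF]
  have h3 : appG c (rowF b s2)
      = List.foldl (fun g i => g + appG c (PySem.List.pyGetD b i [])) (appG c []) s2 :=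
    appG_fold hb c s2 [] List.Pairwise.nil
  rw [h3]
  show List.foldl (fun (g : Int → ZMod 2) (i : Int) =>
      g + phi (PySem.List.pyGetD (composeT b c) i [])) 0 s2 = _
  rw [hfun]
  rfl

theorem compose_assoc {b : List (List Int)} (a c : List (List Int)) (hb : CanonM b) :
    composeT (composeT a b) c = composeT a (composeT b c) := by
  unfold composeT
  rw [List.map_map]
  exact List.map_congr_left (fun s _ => (row_assoc hb c s).symm)

def Rmat (t : List (List Int)) : Nat → List (List Int)
  | 0 => identity_transform t.length
  | k + 1 => composeT t (Rmat t k)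

def Sqmat (t : List (List Int)) : Nat → List (List Int)
  | 0 => t
  | j + 1 => composeT (Sqmat t j) (Sqmat t j)

theorem canonM_composeT (t1 t2 : List (List Int)) : CanonM (composeT t1 t2) := by
  intro r hr
  simp only [composeT, List.mem_map] at hr
  obtain ⟨s, _, rfl⟩ := hr
  exact canonL_rowF t2 s

theorem canonM_identity (n : Nat) : CanonM (identity_transform n) := by
  intro r hr
  simp only [identity_transform, List.mem_map] at hr
  obtain ⟨i, _, rfl⟩ := hr
  exact List.pairwise_singleton _ _

theorem canonM_R (t : List (List Int)) : ∀ k, CanonM (Rmat t k)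
  | 0 => canonM_identity t.length
  | _ + 1 => canonM_composeT _ _

theorem canonM_Sq {t : List (List Int)} (ht : CanonM t) : ∀ j, CanonM (Sqmat t j)
  | 0 => ht
  | _ + 1 => canonM_composeT _ _

theorem length_composeT (t1 t2 : List (List Int)) : (composeT t1 t2).length = t1.length := by
  simp [composeT]

theorem length_R (t : List (List Int)) (k : Nat) : (Rmat t k).length = t.length := by
  cases k with
  | zero => simp [Rmat, identity_transform]
  | succ k => simp [Rmat, length_composeT]

theorem compose_identity_left {x : List (List Int)} (hx : CanonM x) :
    composeT (identity_transform x.length) x = x := by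
  unfold composeT identity_transform
  apply List.ext_getElem (by simp)
  intro i h1 h2
  simp only [List.getElem_map, List.getElem_range]
  show rowF x [(i : Int)] = x[i]
  unfold rowF
  rw [List.foldl_cons, List.foldl_nil]
  have h3 : PySem.List.pyGetD x ((i : Nat) : Int) [] = x[i] := by
    rw [PySem.List.pyGetD_natCast, List.getD_eq_getElem _ _ h2]
  rw [h3]
  have hu : CanonL x[i] := hx _ (List.getElem_mem h2)
  calc symdif [] x[i]
      = canonSet x[i] := canonSet_congr (fun y => by
        constructor
        · intro hy
          rcases (PySem.Set.mem_symmDiff [] x[i] y).mp hy with ⟨hy1, _⟩ | ⟨hy1, _⟩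
          · exact absurd hy1 (by simp)
          · exact hy1
        · intro hy
          exact (PySem.Set.mem_symmDiff [] x[i] y).mpr (Or.inr ⟨hy, by simp⟩))
    _ = x[i] := canonSet_eq_self hu

theorem Sq_R {t : List (List Int)} (ht : CanonM t) :
    ∀ j m, composeT (Sqmat t j) (Rmat t m) = Rmat t (2 ^ j + m) := by
  intro j
  induction j with
  | zero =>
    intro m
    show composeT t (Rmat t m) = Rmat t (2 ^ 0 + m)
    rw [pow_zero, Nat.add_comm 1 m]
    rfl
  | succ j ih =>
    intro m
    show composeT (composeT (Sqmat t j) (Sqmat t j)) (Rmat t m) = _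
    rw [compose_assoc _ _ (canonM_Sq ht j), ih m, ih (2 ^ j + m)]
    congr 1
    rw [pow_succ]
    ring

theorem R_R {t : List (List Int)} (_ht : CanonM t) :
    ∀ a b, composeT (Rmat t a) (Rmat t b) = Rmat t (a + b) := by
  intro a
  induction a with
  | zero =>
    intro b
    show composeT (identity_transform t.length) (Rmat t b) = Rmat t (0 + b)
    rw [Nat.zero_add, ← length_R t b]
    exact compose_identity_left (canonM_R t b)
  | succ a ih =>
    intro b
    show composeT (composeT t (Rmat t a)) (Rmat t b) = Rmat t (a + 1 + b)
    rw [compose_assoc _ _ (canonM_R t a), ih b,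
      show a + 1 + b = (a + b) + 1 from by omega]
    rfl

theorem aLoop_spec {t : List (List Int)} (ht : CanonM t) :
    ∀ (N : Nat) (times : Int), times.toNat = N → ∀ j m,
      aLoop (Sqmat t j) (Rmat t m) times = Rmat t (times.toNat * 2 ^ j + m) := by
  intro N
  induction N using Nat.strong_induction_on with
  | _ N ih =>
    intro times hN j m
    rw [aLoop]
    by_cases hpos : 0 < times
    · rw [dif_pos hpos]
      have hfd : PySem.Int.floordiv times 2 = times / 2 :=
        PySem.Int.floordiv_eq_ediv_of_pos (by omega)
      have hmd : PySem.Int.mod times 2 = times % 2 :=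
        PySem.Int.mod_eq_emod_of_pos (by omega)
      have hrec := ih (times / 2).toNat (by omega) (times / 2) rfl (j + 1)
      rw [hfd, hmd]
      by_cases hb : times % 2 = 1
      · rw [if_pos hb, Sq_R ht j m,
          show composeT (Sqmat t j) (Sqmat t j) = Sqmat t (j + 1) from rfl,
          hrec (2 ^ j + m)]
        congr 1
        have h2 : times.toNat = 2 * (times / 2).toNat + 1 := by omega
        rw [h2, pow_succ]
        ring
      · rw [if_neg hb,
          show composeT (Sqmat t j) (Sqmat t j) = Sqmat t (j + 1) from rfl,
          hrec m]
        congr 1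
        have h2 : times.toNat = 2 * (times / 2).toNat := by omega
        rw [h2, pow_succ]
        ring
    · rw [dif_neg hpos]
      have h0 : times.toNat = 0 := by omega
      rw [h0, Nat.zero_mul, Nat.zero_add]

theorem altCompose_eq (t1 t2 : List (List Int)) : altCompose t1 t2 = composeT t1 t2 := by
  unfold altCompose composeT rowF
  rw [PySem.List.foldl_append_singleton_eq_map, List.nil_append]

theorem altPower_spec {t : List (List Int)} (ht : CanonM t) :
    ∀ (N : Nat) (k : Int), k.toNat = N → altPower t t.length k = Rmat t k.toNat := by
  intro N
  induction N using Nat.strong_induction_on with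
  | _ N ih =>
    intro k hN
    rw [altPower]
    by_cases hk : k ≤ 0
    · rw [dif_pos hk]
      have h0 : k.toNat = 0 := by omega
      rw [h0]
      rfl
    · rw [dif_neg hk]
      have hfd : PySem.Int.floordiv k 2 = k / 2 :=
        PySem.Int.floordiv_eq_ediv_of_pos (by omega)
      have hmd : PySem.Int.mod k 2 = k % 2 :=
        PySem.Int.mod_eq_emod_of_pos (by omega)
      have hrec : altPower t t.length (PySem.Int.floordiv k 2) = Rmat t (k / 2).toNat := by
        rw [hfd]
        exact ih (k / 2).toNat (by omega) (k / 2) rfl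
      simp only [hrec, altCompose_eq, hmd]
      rw [R_R ht]
      by_cases hb : k % 2 = 1
      · rw [if_pos (by omega)]
        have h2 : k.toNat = ((k / 2).toNat + (k / 2).toNat) + 1 := by omega
        rw [h2]
        rfl
      · rw [if_neg (by omega)]
        congr 1
        omega

-- ===== VERDICT =====
theorem repeat_transform_spec : Claim_equal_repeat_transform := by
  unfold Claim_equal_repeat_transform
  intro transform times _ _
  unfold Spec_repeat_transform repeat_transform repeat_transform_alt
  have ht : CanonM (transform.map canonSet) := by
    intro r hr
    simp only [List.mem_map] at hr
    obtain ⟨s, _, rfl⟩ := hr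
    exact canonL_canonSet s
  have hlen : transform.length = (transform.map canonSet).length := by simp
  rw [hlen]
  have hA := aLoop_spec ht times.toNat times rfl 0 0
  simp only [pow_zero, Nat.mul_one, Nat.add_zero] at hA
  have hB := altPower_spec ht times.toNat times rfl
  exact hA.trans hB.symm
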